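-- pv_equiv track=rewrite | github.com/joshuarg007/made4founders | backend/app/ai/deadline_extractor.py | classify_deadline_type
-- ===== SOURCE A (Python) =====
-- def classify_deadline_type(text: str) -> str:
--     """
--     Classify the type of deadline based on context.
--     """
--     text_lower = text.lower()
--
--     if any(w in text_lower for w in ['expir', 'renewal', 'renew']):
--         return 'expiration'
--     if any(w in text_lower for w in ['effective', 'start', 'begin', 'commence']):
--         return 'effective_date'
--     if any(w in text_lower for w in ['file', 'submit', 'tax', 'compliance', 'regulatory']):
--         return 'deadline'
--     if any(w in text_lower for w in ['milestone', 'target', 'goal']):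
--         return 'milestone'
--     if any(w in text_lower for w in ['pay', 'payment', 'due']):
--         return 'payment'
--
--     return 'deadline'
-- ===== SOURCE B (Python) =====
-- _KEY_PRIORITY = {
--     'expir': 0, 'renewal': 0, 'renew': 0,
--     'effective': 1, 'start': 1, 'begin': 1, 'commence': 1,
--     'file': 2, 'submit': 2, 'tax': 2, 'compliance': 2, 'regulatory': 2,
--     'milestone': 3, 'target': 3, 'goal': 3,
--     'pay': 4, 'payment': 4, 'due': 4,
-- }
-- _LABELS = ['expiration', 'effective_date', 'deadline', 'milestone', 'payment']
--
--
-- def classify_deadline_type(text: str) -> str: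
--     # Single left-to-right scan over positions: at each position, record the
--     # best (smallest) priority of any keyword starting there.  The minimum
--     # priority over all positions is exactly the first branch of the
--     # priority-ordered classification that would fire.
--     t = text.lower()
--     best = len(_LABELS)  # 5 = nothing matched yet
--     for i in range(len(t)):
--         for key, prio in _KEY_PRIORITY.items():
--             if prio < best and t.startswith(key, i):
--                 best = prio
--     return _LABELS[best] if best < len(_LABELS) else 'deadline'
-- ===== Notes on version B (the rewrite author's own statement) =====
-- stated objective: alternative
-- what changed: Instead of five sequential per-category substring tests, B scans the text positions once, maintaining the minimum priority of any keyword that starts at each position (a keyword-to-priority map), and maps that minimum to its label at the end; similar cost, different traversal.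
import Mathlib
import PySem

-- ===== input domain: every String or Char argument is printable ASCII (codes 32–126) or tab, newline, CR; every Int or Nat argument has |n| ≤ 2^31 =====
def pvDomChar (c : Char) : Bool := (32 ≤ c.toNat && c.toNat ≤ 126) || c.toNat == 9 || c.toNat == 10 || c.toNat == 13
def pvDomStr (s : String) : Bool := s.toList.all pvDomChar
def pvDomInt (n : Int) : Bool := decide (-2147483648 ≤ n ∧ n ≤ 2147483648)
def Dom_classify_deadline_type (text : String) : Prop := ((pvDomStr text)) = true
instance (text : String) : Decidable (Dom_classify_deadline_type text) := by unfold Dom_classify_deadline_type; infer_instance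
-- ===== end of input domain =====

-- B replaces A's five sequential per-category substring tests by a single positional scan
-- that keeps the minimum priority of any keyword starting at each position (objective: alternative).

-- ===== PORT A =====
def classify_deadline_type (text : String) : String :=
  let text_lower := PySem.Str.lower text
  if (["expir", "renewal", "renew"] : List String).any (fun w => PySem.Str.isIn w text_lower) then
    "expiration"
  else if (["effective", "start", "begin", "commence"] : List String).any (fun w => PySem.Str.isIn w text_lower) then
    "effective_date"
  else if (["file", "submit", "tax", "compliance", "regulatory"] : List String).any (fun w => PySem.Str.isIn w text_lower) then
    "deadline"
  else if (["milestone", "target", "goal"] : List String).any (fun w => PySem.Str.isIn w text_lower) then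
    "milestone"
  else if (["pay", "payment", "due"] : List String).any (fun w => PySem.Str.isIn w text_lower) then
    "payment"
  else
    "deadline"

-- ===== PORT B =====
-- the _KEY_PRIORITY dict of Source B (keys as char lists, for positional prefix tests)
def pvKeyPriority : List (List Char × Nat) :=
  [ ("expir".toList, 0), ("renewal".toList, 0), ("renew".toList, 0),
    ("effective".toList, 1), ("start".toList, 1), ("begin".toList, 1), ("commence".toList, 1),
    ("file".toList, 2), ("submit".toList, 2), ("tax".toList, 2), ("compliance".toList, 2), ("regulatory".toList, 2),
    ("milestone".toList, 3), ("target".toList, 3), ("goal".toList, 3),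
    ("pay".toList, 4), ("payment".toList, 4), ("due".toList, 4) ]

def pvLabels : List String := ["expiration", "effective_date", "deadline", "milestone", "payment"]

-- inner loop of Source B: one position (suffix s), fold over the keyword->priority map
def pvInner (s : List Char) (b : Nat) : Nat :=
  pvKeyPriority.foldl (fun b kp => if kp.2 < b && kp.1.isPrefixOf s then kp.2 else b) b

-- outer loop of Source B: positions i = 0 .. len-1, i.e. the nonempty suffixes, left to right
def pvScan : List Char → Nat → Nat
  | [], b => b
  | c :: rest, b => pvScan rest (pvInner (c :: rest) b)

def classify_deadline_type_alt (text : String) : String :=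
  let t := (PySem.Str.lower text).toList
  let best := pvScan t pvLabels.length
  if best < pvLabels.length then pvLabels.getD best "deadline" else "deadline"

-- ===== PRECONDITION & SPEC =====
def Spec_classify_deadline_type (text : String) (out : String) : Prop := out = classify_deadline_type_alt text
instance (text : String) (out : String) : Decidable (Spec_classify_deadline_type text out) := by unfold Spec_classify_deadline_type; infer_instance

-- ===== CLAIM (what is proved, stated in full; the proofs are below) =====
def Claim_equal_classify_deadline_type : Prop := ∀ (text : String), Dom_classify_deadline_type text → Spec_classify_deadline_type text (classify_deadline_type text)

-- ===== LEMMAS AND PROOFS =====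

-- generic facts about the inner fold
theorem pvInnerGen_le {s : List Char} (R : List (List Char × Nat)) (b : Nat) :
    R.foldl (fun b kp => if kp.2 < b && kp.1.isPrefixOf s then kp.2 else b) b ≤ b := by
  induction R generalizing b with
  | nil => exact le_rfl
  | cons kp R ih =>
      simp only [List.foldl_cons]
      by_cases h : (decide (kp.2 < b) && kp.1.isPrefixOf s) = true
      · rw [if_pos h]
        have hlt : kp.2 < b := by simpa using (Bool.and_eq_true_iff.mp h).1
        exact le_trans (ih kp.2) (le_of_lt hlt)
      · rw [if_neg h]
        exact ih b

theorem pvInnerGen_le_of_mem {s : List Char} {R : List (List Char × Nat)} {k : List Char} {p : Nat}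
    (hmem : (k, p) ∈ R) (hpre : k <+: s) (b : Nat) :
    R.foldl (fun b kp => if kp.2 < b && kp.1.isPrefixOf s then kp.2 else b) b ≤ p := by
  induction R generalizing b with
  | nil => cases hmem
  | cons kp R ih =>
      simp only [List.foldl_cons]
      rcases List.mem_cons.mp hmem with heq | h
      · have hb : kp.1.isPrefixOf s = true := by
          rw [← heq]; exact List.isPrefixOf_iff_prefix.mpr hpre
        by_cases hlt : kp.2 < b
        · rw [if_pos (by simp [hb, hlt])]
          have : kp.2 = p := by rw [← heq]
          exact this ▸ pvInnerGen_le R kp.2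
        · rw [if_neg (by simp [hlt])]
          have hbp : b ≤ p := by
            have h2 : kp.2 = p := by rw [← heq]
            omega
          exact le_trans (pvInnerGen_le R b) hbp
      · by_cases hc : (decide (kp.2 < b) && kp.1.isPrefixOf s) = true
        · rw [if_pos hc]; exact ih h kp.2
        · rw [if_neg hc]; exact ih h b

theorem pvInnerGen_cases {s : List Char} (R : List (List Char × Nat)) (b : Nat) :
    R.foldl (fun b kp => if kp.2 < b && kp.1.isPrefixOf s then kp.2 else b) b = b ∨
    ∃ kp ∈ R, kp.1 <+: s ∧
      R.foldl (fun b kp => if kp.2 < b && kp.1.isPrefixOf s then kp.2 else b) b = kp.2 := by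
  induction R generalizing b with
  | nil => exact Or.inl rfl
  | cons kp R ih =>
      simp only [List.foldl_cons]
      by_cases hc : (decide (kp.2 < b) && kp.1.isPrefixOf s) = true
      · rw [if_pos hc]
        have hpre : kp.1 <+: s :=
          List.isPrefixOf_iff_prefix.mp (Bool.and_eq_true_iff.mp hc).2
        rcases ih kp.2 with h | ⟨kq, hq, hqp, hqe⟩
        · exact Or.inr ⟨kp, List.mem_cons_self .., hpre, h⟩
        · exact Or.inr ⟨kq, List.mem_cons_of_mem _ hq, hqp, hqe⟩
      · rw [if_neg hc]
        rcases ih b with h | ⟨kq, hq, hqp, hqe⟩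
        · exact Or.inl h
        · exact Or.inr ⟨kq, List.mem_cons_of_mem _ hq, hqp, hqe⟩

-- pvScan facts
theorem pvScan_le (l : List Char) (b : Nat) : pvScan l b ≤ b := by
  induction l generalizing b with
  | nil => exact le_rfl
  | cons c rest ih =>
      exact le_trans (ih _) (pvInnerGen_le _ b)

theorem pvScan_le_of_infix {l : List Char} {k : List Char} {p : Nat}
    (hmem : (k, p) ∈ pvKeyPriority) (hne : k ≠ []) (hinf : k <:+: l) (b : Nat) :
    pvScan l b ≤ p := by
  induction l generalizing b with
  | nil =>
      exact absurd (List.eq_nil_of_infix_nil hinf) hne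
  | cons c rest ih =>
      rcases List.infix_cons_iff.mp hinf with hpre | hinf'
      · exact le_trans (pvScan_le rest _) (pvInnerGen_le_of_mem hmem hpre b)
      · exact ih hinf' _

theorem pvScan_cases (l : List Char) (b : Nat) :
    pvScan l b = b ∨ ∃ kp ∈ pvKeyPriority, kp.1 <:+: l ∧ pvScan l b = kp.2 := by
  induction l generalizing b with
  | nil => exact Or.inl rfl
  | cons c rest ih =>
      rcases ih (pvInner (c :: rest) b) with h | ⟨kq, hq, hqinf, hqe⟩
      · rw [show pvScan (c :: rest) b = pvScan rest (pvInner (c :: rest) b) from rfl, h]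
        rcases pvInnerGen_cases (s := c :: rest) pvKeyPriority b with h' | ⟨kp, hp, hppre, hpe⟩
        · exact Or.inl h'
        · exact Or.inr ⟨kp, hp, hppre.isInfix, hpe⟩
      · exact Or.inr ⟨kq, hq, hqinf.trans (List.suffix_cons c rest).isInfix,
          by rw [show pvScan (c :: rest) b = pvScan rest (pvInner (c :: rest) b) from rfl, hqe]⟩

-- bridge: each rule's `any isIn` boolean vs infix of the lowered char list
theorem pvAny_iff (ws : List String) (s : String) :
    ws.any (fun w => PySem.Str.isIn w s) = true ↔ ∃ w ∈ ws, w.toList <:+: s.toList := by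
  simp only [List.any_eq_true]
  constructor
  · rintro ⟨w, hw, h⟩; exact ⟨w, hw, (PySem.Str.isIn_iff_infix w s).mp h⟩
  · rintro ⟨w, hw, h⟩; exact ⟨w, hw, (PySem.Str.isIn_iff_infix w s).mpr h⟩


theorem pvHit (t : List Char) (n : Nat) (h : pvScan t 5 = n) (hlt : n < 5) :
    ∃ kp ∈ pvKeyPriority, kp.2 = n ∧ kp.1 <:+: t := by
  rcases pvScan_cases t 5 with h5 | ⟨kp, hp, hinf, he⟩
  · omega
  · exact ⟨kp, hp, by omega, hinf⟩

theorem pvUp (ws : List String) (i : Nat) (s : String)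
    (hcov : ∀ w ∈ ws, (w.toList, i) ∈ pvKeyPriority ∧ w.toList ≠ [])
    (h : ws.any (fun w => PySem.Str.isIn w s) = true) :
    pvScan s.toList 5 ≤ i := by
  rcases (pvAny_iff ws s).mp h with ⟨w, hw, hinf⟩
  exact pvScan_le_of_infix (hcov w hw).1 (hcov w hw).2 hinf 5

theorem pvMiss (ws : List String) (i : Nat) (s : String) (hlt : i < 5)
    (hcov : ∀ kp ∈ pvKeyPriority, kp.2 = i → ∃ w ∈ ws, w.toList = kp.1)
    (hfalse : ws.any (fun w => PySem.Str.isIn w s) = false) :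
    pvScan s.toList 5 ≠ i := by
  intro h
  rcases pvHit s.toList i h hlt with ⟨kp, hp, hp2, hinf⟩
  rcases hcov kp hp hp2 with ⟨w, hw, hwl⟩
  have : PySem.Str.isIn w s = true := (PySem.Str.isIn_iff_infix w s).mpr (hwl ▸ hinf)
  have := List.any_eq_false.mp hfalse w hw
  simp_all

-- ===== VERDICT (by name: the statement is the Claim_ definition above) =====
theorem classify_deadline_type_spec : Claim_equal_classify_deadline_type := by
  intro text _
  unfold Spec_classify_deadline_type
  simp only [classify_deadline_type, classify_deadline_type_alt]
  have hlen : pvLabels.length = 5 := rfl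
  rw [hlen]
  set s := PySem.Str.lower text with hs
  set n := pvScan s.toList 5 with hn
  have hle5 : n ≤ 5 := pvScan_le _ _
  by_cases h0 : (["expir", "renewal", "renew"] : List String).any (fun w => PySem.Str.isIn w s) = true
  · have h : n = 0 := Nat.le_zero.mp (pvUp _ 0 s (by decide) h0)
    rw [if_pos h0, h]
    rfl
  · have h0f := eq_false_of_ne_true h0
    rw [if_neg h0]
    by_cases h1 : (["effective", "start", "begin", "commence"] : List String).any (fun w => PySem.Str.isIn w s) = true
    · have hub : n ≤ 1 := pvUp _ 1 s (by decide) h1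
      have hne0 : n ≠ 0 := pvMiss _ 0 s (by omega) (by decide) h0f
      have h : n = 1 := by omega
      rw [if_pos h1, h]
      rfl
    · have h1f := eq_false_of_ne_true h1
      rw [if_neg h1]
      by_cases h2 : (["file", "submit", "tax", "compliance", "regulatory"] : List String).any (fun w => PySem.Str.isIn w s) = true
      · have hub : n ≤ 2 := pvUp _ 2 s (by decide) h2
        have hne0 : n ≠ 0 := pvMiss _ 0 s (by omega) (by decide) h0f
        have hne1 : n ≠ 1 := pvMiss _ 1 s (by omega) (by decide) h1f
        have h : n = 2 := by omega
        rw [if_pos h2, h]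
        rfl
      · have h2f := eq_false_of_ne_true h2
        rw [if_neg h2]
        by_cases h3 : (["milestone", "target", "goal"] : List String).any (fun w => PySem.Str.isIn w s) = true
        · have hub : n ≤ 3 := pvUp _ 3 s (by decide) h3
          have hne0 : n ≠ 0 := pvMiss _ 0 s (by omega) (by decide) h0f
          have hne1 : n ≠ 1 := pvMiss _ 1 s (by omega) (by decide) h1f
          have hne2 : n ≠ 2 := pvMiss _ 2 s (by omega) (by decide) h2f
          have h : n = 3 := by omega
          rw [if_pos h3, h]
          rfl
        · have h3f := eq_false_of_ne_true h3
          rw [if_neg h3]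
          by_cases h4 : (["pay", "payment", "due"] : List String).any (fun w => PySem.Str.isIn w s) = true
          · have hub : n ≤ 4 := pvUp _ 4 s (by decide) h4
            have hne0 : n ≠ 0 := pvMiss _ 0 s (by omega) (by decide) h0f
            have hne1 : n ≠ 1 := pvMiss _ 1 s (by omega) (by decide) h1f
            have hne2 : n ≠ 2 := pvMiss _ 2 s (by omega) (by decide) h2f
            have hne3 : n ≠ 3 := pvMiss _ 3 s (by omega) (by decide) h3f
            have h : n = 4 := by omega
            rw [if_pos h4, h]
            rfl
          · have h4f := eq_false_of_ne_true h4
            rw [if_neg h4]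
            have hne0 : n ≠ 0 := pvMiss _ 0 s (by omega) (by decide) h0f
            have hne1 : n ≠ 1 := pvMiss _ 1 s (by omega) (by decide) h1f
            have hne2 : n ≠ 2 := pvMiss _ 2 s (by omega) (by decide) h2f
            have hne3 : n ≠ 3 := pvMiss _ 3 s (by omega) (by decide) h3f
            have hne4 : n ≠ 4 := pvMiss _ 4 s (by omega) (by decide) h4f
            have h : n = 5 := by omega
            rw [h]
            rfl
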